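-- pv_equiv track=rewrite | github.com/blockhead22/CRT-GroundCheck-SSE | personal_agent/ml_contradiction_detector.py | _is_semantic_equivalent
-- ===== SOURCE A (Python) =====
-- from typing import Dict, Any, Optional, Tuple, Set
--
-- def _is_meaningful_substring(substring: str, full_text: str) -> bool:
--     """
--     Check if substring match is meaningful (enrichment) vs accidental word sharing.
--
--     Args:
--         substring: The shorter text
--         full_text: The longer text containing substring
--
--     Returns:
--         True if this is a meaningful substring match (detail enrichment)
--     """
--     # Long substrings are always meaningful
--     if len(substring) > 5:
--         return True
--     # Short substrings must be at start or end to be meaningful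
--     # E.g., "dog" at start of "dog named Max" or "Max the dog" at end
--     return full_text.startswith(substring) or full_text.endswith(substring)
--
-- SEMANTIC_EQUIVALENTS: Dict[str, Set[str]] = {
--     # Education degree synonyms
--     "phd": {"doctorate", "doctoral", "ph.d.", "doctor of philosophy", "doctoral degree"},
--     "doctorate": {"phd", "doctoral", "ph.d.", "doctor of philosophy"},
--     "masters": {"master's", "ms", "ma", "msc", "master of science", "master of arts"},
--     "bachelor": {"bachelor's", "bs", "ba", "bsc", "undergraduate"},
--
--     # Related fields (changing focus within field is refinement, not contradiction)
--     "ml": {"machine learning", "ai", "artificial intelligence", "deep learning"},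
--     "ai": {"artificial intelligence", "ml", "machine learning", "deep learning"},
--     "cs": {"computer science", "computing", "comp sci"},
--     "data science": {"data analytics", "analytics", "data engineering"},
--
--     # Job title synonyms
--     "developer": {"engineer", "programmer", "coder", "software engineer"},
--     "engineer": {"developer", "programmer", "software developer"},
--     "scientist": {"researcher", "analyst"},
--
--     # Relationship terms
--     "married": {"spouse", "husband", "wife", "partner"},
--     "dog": {"pup", "puppy", "pet", "canine"},
--     "cat": {"kitty", "kitten", "pet", "feline"},
-- }
--
-- def _is_semantic_equivalent(old_value: str, new_value: str) -> bool:
--     """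
--     Check if two values are semantically equivalent (not a contradiction).
--
--     Examples that should return True:
--     - "PhD" vs "doctorate" (synonyms)
--     - "ML" vs "Machine Learning" (abbreviation)
--     - "dog" vs "rescue dog" (enrichment)
--
--     This should NOT match:
--     - "PhD" vs "Master's" (different degrees)
--     - "Google" vs "Microsoft" (different companies)
--     """
--     old_lower = str(old_value).lower().strip()
--     new_lower = str(new_value).lower().strip()
--
--     # Exact match
--     if old_lower == new_lower:
--         return True
--
--     # One is substring of other (detail enrichment)
--     # E.g., "dog" → "rescue dog" is enrichment, not contradiction
--     if old_lower in new_lower: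
--         # old is substring of new
--         if _is_meaningful_substring(old_lower, new_lower):
--             return True
--     elif new_lower in old_lower:
--         # new is substring of old
--         if _is_meaningful_substring(new_lower, old_lower):
--             return True
--
--     # Check synonym database
--     old_words = set(old_lower.split())
--     new_words = set(new_lower.split())
--
--     for key, synonyms in SEMANTIC_EQUIVALENTS.items():
--         all_forms = {key} | synonyms
--         # Check both word-level and phrase-level matching
--         # Word-level: check if any word from synonym set is in the text
--         old_has = bool(old_words & all_forms)
--         new_has = bool(new_words & all_forms)
--         # Phrase-level: check if multi-word synonym appears as substring
--         if not (old_has and new_has):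
--             for form in all_forms:
--                 if ' ' in form:  # Multi-word synonym like "machine learning"
--                     if form in old_lower:
--                         old_has = True
--                     if form in new_lower:
--                         new_has = True
--
--         if old_has and new_has:
--             # Both values contain words/phrases from the same synonym set
--             return True
--
--     return False
-- ===== SOURCE B (Python) =====
-- # B: same exact-match and substring-enrichment guards; the synonym scan is
-- # decomposed into a per-text helper that returns the set of matched group keys,
-- # and the final answer is whether the two key-sets intersect.
-- from typing import Dict, Set
--
-- def _is_meaningful_substring(substring: str, full_text: str) -> bool:
--     if len(substring) > 5:
--         return True
--     return full_text.startswith(substring) or full_text.endswith(substring)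
--
-- SEMANTIC_EQUIVALENTS: Dict[str, Set[str]] = {
--     "phd": {"doctorate", "doctoral", "ph.d.", "doctor of philosophy", "doctoral degree"},
--     "doctorate": {"phd", "doctoral", "ph.d.", "doctor of philosophy"},
--     "masters": {"master's", "ms", "ma", "msc", "master of science", "master of arts"},
--     "bachelor": {"bachelor's", "bs", "ba", "bsc", "undergraduate"},
--     "ml": {"machine learning", "ai", "artificial intelligence", "deep learning"},
--     "ai": {"artificial intelligence", "ml", "machine learning", "deep learning"},
--     "cs": {"computer science", "computing", "comp sci"},
--     "data science": {"data analytics", "analytics", "data engineering"},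
--     "developer": {"engineer", "programmer", "coder", "software engineer"},
--     "engineer": {"developer", "programmer", "software developer"},
--     "scientist": {"researcher", "analyst"},
--     "married": {"spouse", "husband", "wife", "partner"},
--     "dog": {"pup", "puppy", "pet", "canine"},
--     "cat": {"kitty", "kitten", "pet", "feline"},
-- }
--
-- def _matched_groups(text: str) -> Set[str]:
--     """Keys of the synonym groups this text matches, by word or by multi-word phrase."""
--     words = set(text.split())
--     groups = set()
--     for key, synonyms in SEMANTIC_EQUIVALENTS.items():
--         forms = {key} | synonyms
--         if (words & forms) or any(' ' in f and f in text for f in forms):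
--             groups.add(key)
--     return groups
--
-- def _is_semantic_equivalent(old_value: str, new_value: str) -> bool:
--     old_lower = str(old_value).lower().strip()
--     new_lower = str(new_value).lower().strip()
--     if old_lower == new_lower:
--         return True
--     if old_lower in new_lower:
--         if _is_meaningful_substring(old_lower, new_lower):
--             return True
--     elif new_lower in old_lower:
--         if _is_meaningful_substring(new_lower, old_lower):
--             return True
--     return bool(_matched_groups(old_lower) & _matched_groups(new_lower))
-- ===== Notes on version B (the rewrite author's own statement) =====
-- stated objective: simpler
-- what changed: The interleaved per-group old_has/new_has flag loop with its conditional phrase rescue is replaced by one per-text helper returning the set of matched group keys (word hit or multi-word-phrase hit), and the result is the intersection test of the two key sets.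
import Mathlib
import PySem

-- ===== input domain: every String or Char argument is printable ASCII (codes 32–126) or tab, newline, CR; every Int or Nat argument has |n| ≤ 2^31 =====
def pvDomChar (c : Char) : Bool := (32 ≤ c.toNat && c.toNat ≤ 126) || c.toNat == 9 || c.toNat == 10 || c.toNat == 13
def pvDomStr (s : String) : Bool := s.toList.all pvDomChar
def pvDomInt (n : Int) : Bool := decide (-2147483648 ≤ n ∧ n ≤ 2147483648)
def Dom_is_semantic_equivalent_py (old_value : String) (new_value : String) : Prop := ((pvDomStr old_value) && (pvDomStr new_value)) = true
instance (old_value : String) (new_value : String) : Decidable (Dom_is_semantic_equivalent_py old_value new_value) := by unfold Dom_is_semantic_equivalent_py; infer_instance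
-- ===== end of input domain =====

-- B keeps A's exact-match and substring-enrichment guards but replaces the interleaved
-- per-group flag loop by a per-text "matched group keys" helper and one set intersection (simpler decomposition).

-- ===== PORT A =====

-- SEMANTIC_EQUIVALENTS as an association list; each group iterated as key :: synonyms
-- (= {key} | synonyms; the flags are OR-accumulated so set-iteration order is immaterial).
def pvTable : List (String × List String) :=
  [("phd", ["doctorate", "doctoral", "ph.d.", "doctor of philosophy", "doctoral degree"]),
   ("doctorate", ["phd", "doctoral", "ph.d.", "doctor of philosophy"]),
   ("masters", ["master's", "ms", "ma", "msc", "master of science", "master of arts"]),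
   ("bachelor", ["bachelor's", "bs", "ba", "bsc", "undergraduate"]),
   ("ml", ["machine learning", "ai", "artificial intelligence", "deep learning"]),
   ("ai", ["artificial intelligence", "ml", "machine learning", "deep learning"]),
   ("cs", ["computer science", "computing", "comp sci"]),
   ("data science", ["data analytics", "analytics", "data engineering"]),
   ("developer", ["engineer", "programmer", "coder", "software engineer"]),
   ("engineer", ["developer", "programmer", "software developer"]),
   ("scientist", ["researcher", "analyst"]),
   ("married", ["spouse", "husband", "wife", "partner"]),
   ("dog", ["pup", "puppy", "pet", "canine"]),
   ("cat", ["kitty", "kitten", "pet", "feline"])]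

-- _is_meaningful_substring, line for line
def pvMeaningful (substring : String) (full_text : String) : Bool :=
  if 5 < PySem.Str.len substring then true
  else PySem.Str.startswith full_text substring || PySem.Str.endswith full_text substring

-- A's 'for key, synonyms in SEMANTIC_EQUIVALENTS.items(): … return True / return False' loop
def pvSynLoopA (old_lower new_lower : String) : Bool :=
  let old_words : PySem.Set String := PySem.Set.ofList (PySem.Str.split₀ old_lower)
  let new_words : PySem.Set String := PySem.Set.ofList (PySem.Str.split₀ new_lower)
  pvTable.any (fun kv =>
    let all_forms := kv.1 :: kv.2
    let old_has0 := !(PySem.Set.inter old_words all_forms).isEmpty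
    let new_has0 := !(PySem.Set.inter new_words all_forms).isEmpty
    let r :=
      if old_has0 && new_has0 then (old_has0, new_has0)
      else all_forms.foldl (fun p form =>
        if PySem.Str.isIn " " form then
          ((if PySem.Str.isIn form old_lower then true else p.1),
           (if PySem.Str.isIn form new_lower then true else p.2))
        else p) (old_has0, new_has0)
    r.1 && r.2)

def is_semantic_equivalent_py (old_value : String) (new_value : String) : Bool :=
  let old_lower := PySem.Str.strip (PySem.Str.lower old_value)
  let new_lower := PySem.Str.strip (PySem.Str.lower new_value)
  if old_lower == new_lower then true
  else if PySem.Str.isIn old_lower new_lower then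
    (if pvMeaningful old_lower new_lower then true else pvSynLoopA old_lower new_lower)
  else if PySem.Str.isIn new_lower old_lower then
    (if pvMeaningful new_lower old_lower then true else pvSynLoopA old_lower new_lower)
  else pvSynLoopA old_lower new_lower

-- ===== PORT B =====

-- _matched_groups: the set of group keys a text matches (word hit or multi-word phrase hit)
def pvMatchedGroups (text : String) : PySem.Set String :=
  let words : PySem.Set String := PySem.Set.ofList (PySem.Str.split₀ text)
  pvTable.foldl (fun groups kv =>
    let forms := kv.1 :: kv.2
    if !(PySem.Set.inter words forms).isEmpty
        || forms.any (fun f => PySem.Str.isIn " " f && PySem.Str.isIn f text) then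
      PySem.Set.add groups kv.1
    else groups) PySem.Set.empty

def is_semantic_equivalent_py_alt (old_value : String) (new_value : String) : Bool :=
  let old_lower := PySem.Str.strip (PySem.Str.lower old_value)
  let new_lower := PySem.Str.strip (PySem.Str.lower new_value)
  if old_lower == new_lower then true
  else if PySem.Str.isIn old_lower new_lower then
    (if pvMeaningful old_lower new_lower then true
     else !(PySem.Set.inter (pvMatchedGroups old_lower) (pvMatchedGroups new_lower)).isEmpty)
  else if PySem.Str.isIn new_lower old_lower then
    (if pvMeaningful new_lower old_lower then true
     else !(PySem.Set.inter (pvMatchedGroups old_lower) (pvMatchedGroups new_lower)).isEmpty)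
  else !(PySem.Set.inter (pvMatchedGroups old_lower) (pvMatchedGroups new_lower)).isEmpty

-- ===== PRECONDITION & SPEC =====
def Spec_is_semantic_equivalent_py (old_value : String) (new_value : String) (out : Bool) : Prop := out = is_semantic_equivalent_py_alt old_value new_value
instance (old_value : String) (new_value : String) (out : Bool) : Decidable (Spec_is_semantic_equivalent_py old_value new_value out) := by unfold Spec_is_semantic_equivalent_py; infer_instance

-- ===== CLAIM (what is proved, stated in full; the proofs are below) =====
def Claim_equal_is_semantic_equivalent_py : Prop := ∀ (old_value : String) (new_value : String), Dom_is_semantic_equivalent_py old_value new_value → Spec_is_semantic_equivalent_py old_value new_value (is_semantic_equivalent_py old_value new_value)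

-- ===== LEMMAS AND PROOFS =====

-- "text matches group kv": a word of the text is one of the forms, or a multi-word form occurs in the text
def pvMatch (text : String) (kv : String × List String) : Bool :=
  !(PySem.Set.inter (PySem.Set.ofList (PySem.Str.split₀ text)) (kv.1 :: kv.2)).isEmpty
    || (kv.1 :: kv.2).any (fun f => PySem.Str.isIn " " f && PySem.Str.isIn f text)

theorem pvFoldA (ol nl : String) (forms : List String) (o n : Bool) :
    forms.foldl (fun p form =>
      if PySem.Str.isIn " " form then
        ((if PySem.Str.isIn form ol then true else p.1),
         (if PySem.Str.isIn form nl then true else p.2))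
      else p) (o, n)
    = (o || forms.any (fun f => PySem.Str.isIn " " f && PySem.Str.isIn f ol),
       n || forms.any (fun f => PySem.Str.isIn " " f && PySem.Str.isIn f nl)) := by
  induction forms generalizing o n with
  | nil => simp
  | cons f t ih =>
    simp only [List.foldl_cons, List.any_cons]
    have hstep : (if PySem.Str.isIn " " f then
        ((if PySem.Str.isIn f ol then true else o),
         (if PySem.Str.isIn f nl then true else n))
      else (o, n))
      = ((o || (PySem.Str.isIn " " f && PySem.Str.isIn f ol)),
         (n || (PySem.Str.isIn " " f && PySem.Str.isIn f nl))) := by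
      cases PySem.Str.isIn " " f <;> cases PySem.Str.isIn f ol <;>
        cases PySem.Str.isIn f nl <;> simp
    rw [hstep, ih]
    simp [Bool.or_assoc]

-- A's per-group decision is exactly "old matches the group AND new matches the group"
theorem pvPerKey (ol nl : String) (kv : String × List String) :
    ((if (!(PySem.Set.inter (PySem.Set.ofList (PySem.Str.split₀ ol)) (kv.1 :: kv.2)).isEmpty
          && !(PySem.Set.inter (PySem.Set.ofList (PySem.Str.split₀ nl)) (kv.1 :: kv.2)).isEmpty) then
        (!(PySem.Set.inter (PySem.Set.ofList (PySem.Str.split₀ ol)) (kv.1 :: kv.2)).isEmpty,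
         !(PySem.Set.inter (PySem.Set.ofList (PySem.Str.split₀ nl)) (kv.1 :: kv.2)).isEmpty)
      else (kv.1 :: kv.2).foldl (fun p form =>
        if PySem.Str.isIn " " form then
          ((if PySem.Str.isIn form ol then true else p.1),
           (if PySem.Str.isIn form nl then true else p.2))
        else p)
        (!(PySem.Set.inter (PySem.Set.ofList (PySem.Str.split₀ ol)) (kv.1 :: kv.2)).isEmpty,
         !(PySem.Set.inter (PySem.Set.ofList (PySem.Str.split₀ nl)) (kv.1 :: kv.2)).isEmpty)).1
      && (if (!(PySem.Set.inter (PySem.Set.ofList (PySem.Str.split₀ ol)) (kv.1 :: kv.2)).isEmpty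
          && !(PySem.Set.inter (PySem.Set.ofList (PySem.Str.split₀ nl)) (kv.1 :: kv.2)).isEmpty) then
        (!(PySem.Set.inter (PySem.Set.ofList (PySem.Str.split₀ ol)) (kv.1 :: kv.2)).isEmpty,
         !(PySem.Set.inter (PySem.Set.ofList (PySem.Str.split₀ nl)) (kv.1 :: kv.2)).isEmpty)
      else (kv.1 :: kv.2).foldl (fun p form =>
        if PySem.Str.isIn " " form then
          ((if PySem.Str.isIn form ol then true else p.1),
           (if PySem.Str.isIn form nl then true else p.2))
        else p)
        (!(PySem.Set.inter (PySem.Set.ofList (PySem.Str.split₀ ol)) (kv.1 :: kv.2)).isEmpty,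
         !(PySem.Set.inter (PySem.Set.ofList (PySem.Str.split₀ nl)) (kv.1 :: kv.2)).isEmpty)).2)
    = (pvMatch ol kv && pvMatch nl kv) := by
  by_cases h : (!(PySem.Set.inter (PySem.Set.ofList (PySem.Str.split₀ ol)) (kv.1 :: kv.2)).isEmpty
      && !(PySem.Set.inter (PySem.Set.ofList (PySem.Str.split₀ nl)) (kv.1 :: kv.2)).isEmpty) = true
  · rw [if_pos h]
    rw [Bool.and_eq_true] at h
    unfold pvMatch
    rw [h.1, h.2]
    rfl
  · rw [if_neg h, pvFoldA]
    unfold pvMatch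
    rfl

-- membership in B's matched-group set
theorem pvMemGroups (text : String) (k : String) :
    k ∈ pvMatchedGroups text ↔ ∃ kv ∈ pvTable, kv.1 = k ∧ pvMatch text kv = true := by
  unfold pvMatchedGroups
  simp only [pvMatch]
  generalize pvTable = l
  induction l using List.reverseRecOn with
  | nil => simp [PySem.Set.empty]
  | append_singleton t kv ih =>
    rw [List.foldl_append]
    simp only [List.foldl_cons, List.foldl_nil]
    by_cases hm : (!(PySem.Set.inter (PySem.Set.ofList (PySem.Str.split₀ text)) (kv.1 :: kv.2)).isEmpty
        || (kv.1 :: kv.2).any fun f => PySem.Str.isIn " " f && PySem.Str.isIn f text) = true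
    · rw [if_pos hm, PySem.Set.mem_add, ih]
      constructor
      · rintro (⟨kv', h1, h2, h3⟩ | rfl)
        · exact ⟨kv', by simp [h1], h2, h3⟩
        · exact ⟨kv, by simp, rfl, hm⟩
      · rintro ⟨kv', h1, h2, h3⟩
        rcases List.mem_append.1 h1 with h | h
        · exact Or.inl ⟨kv', h, h2, h3⟩
        · simp at h; subst h; exact Or.inr h2.symm
    · rw [if_neg hm, ih]
      constructor
      · rintro ⟨kv', h1, h2, h3⟩
        exact ⟨kv', by simp [h1], h2, h3⟩
      · rintro ⟨kv', h1, h2, h3⟩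
        rcases List.mem_append.1 h1 with h | h
        · exact ⟨kv', h, h2, h3⟩
        · simp at h; subst h; exact absurd h3 (by simpa using hm)

theorem pvKeysNodup : (pvTable.map Prod.fst).Nodup := by decide

-- the synonym loops agree
theorem pvSynEq (ol nl : String) :
    pvSynLoopA ol nl = !(PySem.Set.inter (pvMatchedGroups ol) (pvMatchedGroups nl)).isEmpty := by
  have hA : pvSynLoopA ol nl = pvTable.any (fun kv => pvMatch ol kv && pvMatch nl kv) := by
    unfold pvSynLoopA
    exact List.any_congr rfl (fun kv => pvPerKey ol nl kv)
  rw [hA]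
  cases h : pvTable.any (fun kv => pvMatch ol kv && pvMatch nl kv) with
  | false =>
    -- no group matches both: the intersection is empty
    symm
    rw [Bool.not_eq_false']
    rw [List.isEmpty_iff, PySem.Set.inter, List.filter_eq_nil_iff]
    intro k hk hc
    rcases (pvMemGroups ol k).1 hk with ⟨kv, hmem, hkey, hmatch⟩
    have hk2 := (PySem.Set.contains_iff _ _).1 hc
    rcases (pvMemGroups nl k).1 hk2 with ⟨kv', hmem', hkey', hmatch'⟩
    have heq : kv = kv' := List.inj_on_of_nodup_map pvKeysNodup hmem hmem' (by rw [hkey, hkey'])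
    subst heq
    have hf : ¬ (pvMatch ol kv && pvMatch nl kv) = true := List.any_eq_false.1 h kv hmem
    exact hf (by rw [hmatch, hmatch']; rfl)
  | true =>
    -- some group matches both: its key is in the intersection
    rcases List.any_eq_true.1 h with ⟨kv, hmem, hb⟩
    rw [Bool.and_eq_true] at hb
    have h1 : kv.1 ∈ pvMatchedGroups ol := (pvMemGroups ol kv.1).2 ⟨kv, hmem, rfl, hb.1⟩
    have h2 : kv.1 ∈ pvMatchedGroups nl := (pvMemGroups nl kv.1).2 ⟨kv, hmem, rfl, hb.2⟩
    have hin : kv.1 ∈ PySem.Set.inter (pvMatchedGroups ol) (pvMatchedGroups nl) := by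
      rw [PySem.Set.inter, List.mem_filter]
      exact ⟨h1, (PySem.Set.contains_iff _ _).2 h2⟩
    symm
    rw [Bool.not_eq_true']
    simp only [List.isEmpty_eq_false_iff_exists_mem]
    exact ⟨kv.1, hin⟩

-- ===== VERDICT (by name: the statement is the Claim_ definition above) =====
theorem is_semantic_equivalent_py_spec : Claim_equal_is_semantic_equivalent_py := by
  intro old_value new_value _
  unfold Spec_is_semantic_equivalent_py is_semantic_equivalent_py is_semantic_equivalent_py_alt
  simp only [pvSynEq]
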